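-- pv_equiv track=rewrite | github.com/aba-ada-sam/drop-cat-studio | core/hw_encoders.py | best_encoder
-- ===== SOURCE A (Python) =====
-- def best_encoder(available: list) -> str | None:
--     """Pick the best available HW encoder: prefer HW H.264, then HW H.265.
--
--     Returns encoder ID string or None if no hardware encoder available.
--     """
--     hw264 = [e for e in available if e[2] and "264" in e[0]]
--     if hw264:
--         return hw264[0][0]
--     hw265 = [e for e in available if e[2] and ("265" in e[0] or "hevc" in e[0])]
--     if hw265:
--         return hw265[0][0]
--     return None
-- ===== SOURCE B (Python) =====
-- def best_encoder(available: list) -> str | None: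
--     """Pick the best available HW encoder: prefer HW H.264, then HW H.265.
--
--     Single pass over `available`, keeping the first H.264 and first H.265 hit.
--     """
--     first264 = None
--     first265 = None
--     for e in available:
--         if e[2]:
--             name = e[0]
--             if first264 is None and "264" in name:
--                 first264 = name
--             elif first265 is None and ("265" in name or "hevc" in name):
--                 first265 = name
--     return first264 if first264 is not None else first265
-- ===== Notes on version B (the rewrite author's own statement) =====
-- stated objective: alternative
-- what changed: Replaces A's two full filtering passes (building two intermediate lists) with one loop over the list that maintains the first H.264 and first H.265 matches.
import Mathlib
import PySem

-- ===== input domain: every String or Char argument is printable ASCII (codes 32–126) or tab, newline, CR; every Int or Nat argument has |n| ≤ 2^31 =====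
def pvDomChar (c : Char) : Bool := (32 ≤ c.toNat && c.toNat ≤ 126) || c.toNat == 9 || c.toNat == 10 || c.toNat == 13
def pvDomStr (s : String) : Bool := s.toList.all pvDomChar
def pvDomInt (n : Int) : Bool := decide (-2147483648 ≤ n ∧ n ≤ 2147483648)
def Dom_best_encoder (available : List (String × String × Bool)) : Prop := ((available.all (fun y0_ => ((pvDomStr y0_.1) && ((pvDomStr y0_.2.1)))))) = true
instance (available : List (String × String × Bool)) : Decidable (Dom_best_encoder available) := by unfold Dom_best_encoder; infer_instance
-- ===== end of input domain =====

-- B replaces A's two filtering passes (two intermediate lists) by one fold over the list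
-- keeping the first H.264 and first H.265 matches; objective: single-pass alternative.

-- ===== PORT A =====
def best_encoder (available : List (String × String × Bool)) : Option String :=
  let hw264 := available.filter (fun e => e.2.2 && PySem.Str.isIn "264" e.1)
  match hw264 with
  | e :: _ => some e.1
  | [] =>
    let hw265 := available.filter (fun e => e.2.2 && (PySem.Str.isIn "265" e.1 || PySem.Str.isIn "hevc" e.1))
    match hw265 with
    | e :: _ => some e.1
    | [] => none

-- ===== PORT B =====
def bStep (acc : Option String × Option String) (e : String × String × Bool) :
    Option String × Option String :=
  if e.2.2 then
    if acc.1.isNone && PySem.Str.isIn "264" e.1 then (some e.1, acc.2)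
    else if acc.2.isNone && (PySem.Str.isIn "265" e.1 || PySem.Str.isIn "hevc" e.1) then (acc.1, some e.1)
    else acc
  else acc

def best_encoder_alt (available : List (String × String × Bool)) : Option String :=
  let p := available.foldl bStep (none, none)
  match p.1 with
  | some x => some x
  | none => p.2

-- ===== PRECONDITION & SPEC =====
def Spec_best_encoder (available : List (String × String × Bool)) (out : Option String) : Prop := out = best_encoder_alt available
instance (available : List (String × String × Bool)) (out : Option String) : Decidable (Spec_best_encoder available out) := by unfold Spec_best_encoder; infer_instance

-- ===== CLAIM (what is proved, stated in full; the proofs are below) =====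
def Claim_equal_best_encoder : Prop := ∀ (available : List (String × String × Bool)), Dom_best_encoder available → Spec_best_encoder available (best_encoder available)

-- ===== LEMMAS AND PROOFS =====

-- A set first component is never changed by one step.
theorem bStep_fst_some (x : String) (b : Option String) (e : String × String × Bool) :
    (bStep (some x, b) e).1 = some x := by
  simp only [bStep]
  split_ifs <;> simp_all

-- … nor by the rest of the fold.
theorem fold_fst_some (l : List (String × String × Bool)) (x : String) (b : Option String) :
    (l.foldl bStep (some x, b)).1 = some x := by
  induction l generalizing b with
  | nil => rfl
  | cons e t ih =>
    rw [List.foldl_cons]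
    rcases hs : bStep (some x, b) e with ⟨f, s⟩
    have hf : f = some x := by rw [← bStep_fst_some x b e, hs]
    rw [hf]; exact ih s

-- With no 264-hit yet, the first component of the fold is the head of A's hw264 filter.
theorem fold_fst (l : List (String × String × Bool)) (b : Option String) :
    (l.foldl bStep (none, b)).1 =
      ((l.filter (fun e => e.2.2 && PySem.Str.isIn "264" e.1)).head?.map (·.1)) := by
  induction l generalizing b with
  | nil => rfl
  | cons e t ih =>
    rw [List.foldl_cons, List.filter_cons]
    by_cases h : (e.2.2 && PySem.Str.isIn "264" e.1) = true
    · rw [if_pos h]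
      have hstep : bStep (none, b) e = (some e.1, b) := by
        have h' := h; rw [Bool.and_eq_true] at h'
        simp only [bStep, Option.isNone_none, Bool.true_and]
        rw [if_pos h'.1, if_pos h'.2]
      rw [hstep, fold_fst_some]; rfl
    · rw [if_neg h]
      rcases hs : bStep (none, b) e with ⟨f, s⟩
      have hf : f = none := by
        have : (bStep (none, b) e).1 = none := by
          simp only [bStep]; split_ifs <;> simp_all
        rw [hs] at this; exact this
      rw [hf]; exact ih s

-- With no 264-hit in the rest of the list, a set second component is frozen.
theorem fold_snd_frozen (l : List (String × String × Bool)) (y : String)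
    (h : ∀ e ∈ l, ¬(e.2.2 && PySem.Str.isIn "264" e.1) = true) :
    (l.foldl bStep (none, some y)).2 = some y := by
  induction l with
  | nil => rfl
  | cons e t ih =>
    rw [List.foldl_cons]
    have he := h e (List.mem_cons_self)
    have hstep : bStep (none, some y) e = (none, some y) := by
      simp only [bStep]; split_ifs <;> simp_all
    rw [hstep]
    exact ih (fun e' he' => h e' (List.mem_cons_of_mem _ he'))

-- When A's hw264 filter is empty, the second component is the head of A's hw265 filter.
theorem fold_snd (l : List (String × String × Bool))
    (h : ∀ e ∈ l, ¬(e.2.2 && PySem.Str.isIn "264" e.1) = true) :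
    (l.foldl bStep (none, none)).2 =
      ((l.filter (fun e => e.2.2 && (PySem.Str.isIn "265" e.1 || PySem.Str.isIn "hevc" e.1))).head?.map (·.1)) := by
  induction l with
  | nil => rfl
  | cons e t ih =>
    rw [List.foldl_cons, List.filter_cons]
    have he := h e (List.mem_cons_self)
    have ht : ∀ e' ∈ t, ¬(e'.2.2 && PySem.Str.isIn "264" e'.1) = true :=
      fun e' he' => h e' (List.mem_cons_of_mem _ he')
    by_cases h265 : (e.2.2 && (PySem.Str.isIn "265" e.1 || PySem.Str.isIn "hevc" e.1)) = true
    · rw [if_pos h265]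
      have hstep : bStep (none, none) e = (none, some e.1) := by
        simp only [bStep]; split_ifs <;> simp_all
      rw [hstep, fold_snd_frozen t e.1 ht]; rfl
    · rw [if_neg h265]
      have hstep : bStep (none, none) e = (none, none) := by
        simp only [bStep]; split_ifs <;> simp_all
      rw [hstep]; exact ih ht

-- ===== VERDICT (by name: the statement is the Claim_ definition above) =====
theorem best_encoder_spec : Claim_equal_best_encoder := by
  intro available _
  unfold Spec_best_encoder
  simp only [best_encoder, best_encoder_alt]
  rcases hp : available.foldl bStep (none, none) with ⟨f, s⟩
  have h1 := fold_fst available none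
  rw [hp] at h1
  cases hf : available.filter (fun e => e.2.2 && PySem.Str.isIn "264" e.1) with
  | cons e t =>
    rw [hf] at h1
    rw [h1]; rfl
  | nil =>
    rw [hf] at h1
    simp only [List.head?_nil, Option.map_none] at h1
    have h2 := fold_snd available (List.filter_eq_nil_iff.mp hf)
    rw [hp] at h2
    rw [h1]
    cases hg : available.filter (fun e => e.2.2 && (PySem.Str.isIn "265" e.1 || PySem.Str.isIn "hevc" e.1)) with
    | cons g u => rw [hg] at h2; rw [h2]; rfl
    | nil => rw [hg] at h2; simp only [List.head?_nil, Option.map_none] at h2; rw [h2]
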